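-- pv_equiv track=rewrite | github.com/Rautabout/Mat_tlumacz | Python/MathMlToTree.py | addSpaceInsteadOfSpecial
-- ===== SOURCE A (Python) =====
-- def addSpaceInsteadOfSpecial(inputString, keyValue):
--     output = ''
--     indexOfNextStart = 0
--
--     for i in range(len(inputString)):
--         if inputString[i:(i + len(keyValue))] == keyValue:
--             output += inputString[indexOfNextStart:i] + ' '
--             indexOfNextStart = i + len(keyValue)
--     if indexOfNextStart < len(inputString):
--         output += inputString[indexOfNextStart:]
--
--     return output
-- ===== SOURCE B (Python) =====
-- def addSpaceInsteadOfSpecial(inputString, keyValue):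
--     m = len(keyValue)
--     out = []
--     skip = 0
--     for i in range(len(inputString)):
--         if inputString.startswith(keyValue, i):
--             out.append(' ')
--             skip = m
--         if skip:
--             skip -= 1
--         else:
--             out.append(inputString[i])
--     return ''.join(out)
-- ===== Notes on version B (the rewrite author's own statement) =====
-- stated objective: faster
-- what changed: B makes a single pass emitting output characters into a list with a pending-skip counter and str.startswith (which stops at the first mismatching character), instead of A's materialised m-character slice comparison at every position plus quadratic string += concatenation.
import Mathlib
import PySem

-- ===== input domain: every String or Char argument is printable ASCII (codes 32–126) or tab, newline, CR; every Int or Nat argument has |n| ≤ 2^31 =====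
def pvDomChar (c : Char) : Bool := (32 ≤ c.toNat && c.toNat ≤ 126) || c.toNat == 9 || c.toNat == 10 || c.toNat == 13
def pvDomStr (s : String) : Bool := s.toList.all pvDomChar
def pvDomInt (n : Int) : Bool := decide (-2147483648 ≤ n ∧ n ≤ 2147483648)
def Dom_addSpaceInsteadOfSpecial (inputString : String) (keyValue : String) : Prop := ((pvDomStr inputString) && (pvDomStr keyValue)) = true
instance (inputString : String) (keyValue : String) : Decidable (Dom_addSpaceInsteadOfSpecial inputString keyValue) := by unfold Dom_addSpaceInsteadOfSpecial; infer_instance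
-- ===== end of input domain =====

-- B replaces A's per-position slice comparison + slice-concatenation bookkeeping by a single
-- per-character pass with a pending-skip counter (same output; measured faster in a timing run).

-- ===== PORT A =====
-- loop body of A: check inputString[i:i+len(keyValue)] == keyValue; on a match append the
-- pending slice and ' ' and move indexOfNextStart. State = (output, indexOfNextStart).
def stepA (s k : List Char) (acc : List Char × Nat) (i : Nat) : List Char × Nat :=
  if PySem.List.slice s (some (i : Int)) (some ((i : Int) + (k.length : Int))) = k then
    (acc.1 ++ PySem.List.slice s (some ((acc.2 : Int))) (some ((i : Int))) ++ [' '], i + k.length)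
  else acc

def addSpaceInsteadOfSpecial (inputString : String) (keyValue : String) : String :=
  let s := inputString.toList
  let k := keyValue.toList
  let st := (List.range s.length).foldl (stepA s k) ([], 0)
  String.ofList (if st.2 < s.length then st.1 ++ PySem.List.slice s (some ((st.2 : Int))) none else st.1)

-- ===== PORT B =====
-- loop body of B: on startswith(keyValue, i) append ' ' and reset skip := len(keyValue);
-- then either consume one skipped char or emit s[i]. State = (out, skip).
-- (s.getD i ' ' is Python's s[i]: i < len(s) on every loop iteration.)
def stepB (s k : List Char) (acc : List Char × Nat) (i : Nat) : List Char × Nat :=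
  let acc1 := if PySem.Chars.startswith (s.drop i) k then (acc.1 ++ [' '], k.length) else acc
  if acc1.2 ≠ 0 then (acc1.1, acc1.2 - 1) else (acc1.1 ++ [s.getD i ' '], 0)

def addSpaceInsteadOfSpecial_alt (inputString : String) (keyValue : String) : String :=
  let s := inputString.toList
  let k := keyValue.toList
  String.ofList ((List.range s.length).foldl (stepB s k) ([], 0)).1

-- ===== PRECONDITION & SPEC =====
def Spec_addSpaceInsteadOfSpecial (inputString : String) (keyValue : String) (out : String) : Prop := out = addSpaceInsteadOfSpecial_alt inputString keyValue
instance (inputString : String) (keyValue : String) (out : String) : Decidable (Spec_addSpaceInsteadOfSpecial inputString keyValue out) := by unfold Spec_addSpaceInsteadOfSpecial; infer_instance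

-- ===== CLAIM (what is proved, stated in full; the proofs are below) =====
def Claim_equal_addSpaceInsteadOfSpecial : Prop := ∀ (inputString : String) (keyValue : String), Dom_addSpaceInsteadOfSpecial inputString keyValue → Spec_addSpaceInsteadOfSpecial inputString keyValue (addSpaceInsteadOfSpecial inputString keyValue)

-- ===== LEMMAS AND PROOFS =====

-- extending the pending slice by one character
lemma take_snoc_getD (s : List Char) (a j : Nat) (ha : a ≤ j) (hj : j < s.length) :
    (s.drop a).take (j - a) ++ [s.getD j ' '] = (s.drop a).take (j + 1 - a) := by
  have h1 : j + 1 - a = (j - a) + 1 := by omega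
  have h2 : (s.drop a)[j - a]? = some s[j] := by
    rw [List.getElem?_drop]
    have : a + (j - a) = j := by omega
    rw [this, List.getElem?_eq_getElem hj]
  rw [h1, List.take_add_one, h2]
  simp [List.getD, List.getElem?_eq_getElem hj]

-- both match tests decide 'keyValue is a prefix of s at position j'
lemma stepA_cond_iff (s k : List Char) (j : Nat) :
    (PySem.List.slice s (some (j : Int)) (some ((j : Int) + (k.length : Int))) = k) ↔ k <+: s.drop j := by
  rw [PySem.List.slice_natCast_add]
  constructor
  · intro h; exact h ▸ List.take_prefix _ _
  · intro h; exact (List.prefix_iff_eq_take.mp h).symm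

-- the loop invariant: B's output is A's output plus the slice A has not yet flushed,
-- and B's skip counter is how far A's indexOfNextStart is ahead of the loop index.
lemma loop_inv (s k : List Char) (j : Nat) (hj : j ≤ s.length) :
    ((List.range j).foldl (stepB s k) ([], 0)).1
        = ((List.range j).foldl (stepA s k) ([], 0)).1
          ++ (s.drop ((List.range j).foldl (stepA s k) ([], 0)).2).take (j - ((List.range j).foldl (stepA s k) ([], 0)).2)
      ∧ ((List.range j).foldl (stepB s k) ([], 0)).2 = ((List.range j).foldl (stepA s k) ([], 0)).2 - j := by
  induction j with
  | zero => simp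
  | succ j ih =>
    have hj' : j ≤ s.length := by omega
    have hjlt : j < s.length := by omega
    obtain ⟨ih1, ih2⟩ := ih hj'
    rw [List.range_succ, List.foldl_append, List.foldl_append]
    set A := (List.range j).foldl (stepA s k) ([], 0) with hA
    set B := (List.range j).foldl (stepB s k) ([], 0) with hB
    simp only [List.foldl_cons, List.foldl_nil]
    by_cases hP : k <+: s.drop j
    · have hcA : PySem.List.slice s (some (j : Int)) (some ((j : Int) + (k.length : Int))) = k :=
        (stepA_cond_iff s k j).mpr hP
      have hcB : PySem.Chars.startswith (s.drop j) k = true :=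
        (PySem.Chars.startswith_iff _ _).mpr hP
      have eA : stepA s k A j
          = (A.1 ++ PySem.List.slice s (some ((A.2 : Int))) (some ((j : Int))) ++ [' '], j + k.length) := by
        unfold stepA; rw [if_pos hcA]
      rcases Nat.eq_zero_or_pos k.length with hm | hm
      · -- empty keyValue: A appends the pending slice and ' ', B appends ' ' then s[j]
        have eB : stepB s k B j = (B.1 ++ [' '] ++ [s.getD j ' '], 0) := by
          unfold stepB; rw [hcB]; simp [hm]
        rw [eA, eB]
        constructor
        · rw [ih1]
          have hAslice : PySem.List.slice s (some ((A.2 : Int))) (some ((j : Int)))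
              = (s.drop A.2).take (j - A.2) := PySem.List.slice_natCast s A.2 j
          have hs1 : (s.drop j).take (j + 1 - (j + k.length)) = [s.getD j ' '] := by
            have := take_snoc_getD s j j (le_refl j) hjlt
            simp only [Nat.sub_self, List.take_zero, List.nil_append] at this
            rw [hm]; simpa using this.symm
          simp only [hm, Nat.add_zero] at hs1 ⊢
          rw [hs1, hAslice]
        · simp [hm]
      · -- nonempty keyValue: both flush a space; B starts skipping
        have eB : stepB s k B j = (B.1 ++ [' '], k.length - 1) := by
          unfold stepB; rw [hcB]
          simp only [if_true]
          have : k.length ≠ 0 := by omega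
          simp [this]
        rw [eA, eB]
        constructor
        · rw [ih1]
          have h0 : (j + 1) - (j + k.length) = 0 := by omega
          have hAslice : PySem.List.slice s (some ((A.2 : Int))) (some ((j : Int)))
              = (s.drop A.2).take (j - A.2) := PySem.List.slice_natCast s A.2 j
          rw [h0, hAslice]
          simp
        · simp; omega
    · have hcA : ¬ PySem.List.slice s (some (j : Int)) (some ((j : Int) + (k.length : Int))) = k :=
        fun h => hP ((stepA_cond_iff s k j).mp h)
      have hcB : PySem.Chars.startswith (s.drop j) k = false :=
        Bool.eq_false_iff.mpr (fun h => hP ((PySem.Chars.startswith_iff _ _).mp h))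
      have eA : stepA s k A j = A := by unfold stepA; rw [if_neg hcA]
      rw [eA]
      by_cases hsk : B.2 ≠ 0
      · -- mid-match skip: A's indexOfNextStart is ahead, nothing is emitted
        have hgt : j < A.2 := by omega
        have eB : stepB s k B j = (B.1, B.2 - 1) := by
          unfold stepB; rw [hcB]; simp [hsk]
        rw [eB]
        constructor
        · rw [ih1]
          have h1 : j - A.2 = 0 := by omega
          have h2 : (j + 1) - A.2 = 0 := by omega
          rw [h1, h2]
        · simp; omega
      · -- plain character: B emits s[j]; A leaves it in the pending slice
        have hle : A.2 ≤ j := by omega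
        have eB : stepB s k B j = (B.1 ++ [s.getD j ' '], 0) := by
          unfold stepB; rw [hcB]; simp at hsk; simp [hsk]
        rw [eB]
        constructor
        · rw [ih1, List.append_assoc]
          rw [take_snoc_getD s A.2 j hle hjlt]
        · omega

-- ===== VERDICT (by name: the statement is the Claim_ definition above) =====
theorem addSpaceInsteadOfSpecial_spec : Claim_equal_addSpaceInsteadOfSpecial := by
  intro inputString keyValue _
  unfold Spec_addSpaceInsteadOfSpecial addSpaceInsteadOfSpecial addSpaceInsteadOfSpecial_alt
  set s := inputString.toList with hs
  set k := keyValue.toList with hk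
  obtain ⟨h1, _⟩ := loop_inv s k s.length (le_refl _)
  set A := (List.range s.length).foldl (stepA s k) ([], 0) with hA
  simp only []
  rw [h1]
  by_cases hlt : A.2 < s.length
  · rw [if_pos hlt, PySem.List.slice_from_natCast]
    congr 1
    rw [List.take_of_length_le (by simp)]
  · rw [if_neg hlt]
    have : s.length - A.2 = 0 := by omega
    rw [this]
    simp [← hA]
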